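-- pv_equiv track=rewrite | github.com/PeachyCodes/Fundamentos | Trabajo Práctico 6/tp6_14.py | digitocentral
-- ===== SOURCE A (Python) =====
-- def digitocentral(a):
--     i=0
--     par=-1
--     const=a
--     digito=0
--     divmodu=0
--     divent=0
--     #si a es -, lo hago +.
--     if a<0:
--         a=a*(-1)
--         const=a
--     #si a tiene mas de 4 digitos, que se ejecute
--     if a>999:
--     #contador verificar cant digitos
--         while a>0:
--             a=a//10
--             i=i+1
--         #si a es impar, se ejecuta
--         if i%2==1:
--             divmodu=(const//(10**((i//2)+1)))*(10**(i//2))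
--             divent=(10**(i//2))
--             digito=(const%divmodu)//divent
--         #si a es par, devuelve -1
--         else:
--             digito=par
--     else:
--         #si a tiene 3 digitos, que devuelva el del medio
--         if a>99 and a<1000:
--             digito=(const//10)%10
--         else:
--             #si a tiene 2 digitos, es par
--             if a>9:
--                 digito=par
--             #si a tiene 1 digito, se impar.
--             else:
--                 digito=a
--     return digito
-- ===== SOURCE B (Python) =====
-- def digitocentral(a):
--     s = str(abs(a))
--     if len(s) % 2 == 1:
--         return int(s[len(s) // 2])
--     return -1
-- ===== Notes on version B (the rewrite author's own statement) =====
-- stated objective: simpler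
-- what changed: Replaces the digit-counting while-loop, the power-of-ten modular extraction and the special-cased branches for short numbers with a single decimal-string formulation: stringify the absolute value and index its middle character when the length is odd, else return minus one.
import Mathlib
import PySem

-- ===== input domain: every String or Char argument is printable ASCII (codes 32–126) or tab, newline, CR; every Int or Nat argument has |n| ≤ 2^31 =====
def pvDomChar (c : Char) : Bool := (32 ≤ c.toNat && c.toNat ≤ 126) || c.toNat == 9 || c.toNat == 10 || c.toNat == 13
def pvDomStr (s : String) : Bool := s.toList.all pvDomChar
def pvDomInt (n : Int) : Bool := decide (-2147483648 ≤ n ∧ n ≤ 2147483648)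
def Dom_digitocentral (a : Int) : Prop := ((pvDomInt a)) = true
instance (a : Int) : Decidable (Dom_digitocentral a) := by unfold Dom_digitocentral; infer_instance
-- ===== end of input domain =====

-- B replaces A's digit-counting loop, power-of-ten extraction and hard-coded 1/2/3-digit
-- branches by one decimal-string formulation (middle character of str(|a|)); objective: simpler.

-- ===== PORT A =====
-- the 'while a > 0: a = a // 10; i = i + 1' loop of A, returning the final (a, i)
def pvCountLoop (a i : Int) : Int × Int :=
  if a > 0 then pvCountLoop (PySem.Int.floordiv a 10) (i + 1) else (a, i)
termination_by a.toNat
decreasing_by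
  rw [PySem.Int.floordiv_eq_ediv_of_pos (by norm_num)]
  omega

def digitocentral (a : Int) : Int :=
  let i : Int := 0
  let par : Int := -1
  -- 'if a < 0: a = a*(-1); const = a' — both a and const become a*(-1)
  let a := if a < 0 then a * (-1) else a
  let const := a
  if a > 999 then
    let (_, i) := pvCountLoop a i
    if PySem.Int.mod i 2 = 1 then
      -- 10 ** e with e = i//2 (+1) ≥ 0, so '.toNat' on the exponent is exact here
      let divmodu := PySem.Int.floordiv const (10 ^ (PySem.Int.floordiv i 2 + 1).toNat) *
        10 ^ (PySem.Int.floordiv i 2).toNat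
      let divent : Int := 10 ^ (PySem.Int.floordiv i 2).toNat
      PySem.Int.floordiv (PySem.Int.mod const divmodu) divent
    else par
  else
    if a > 99 ∧ a < 1000 then PySem.Int.mod (PySem.Int.floordiv const 10) 10
    else if a > 9 then par else a

-- ===== PORT B =====
def digitocentral_alt (a : Int) : Int :=
  -- s = str(abs(a)); written inline (same single value)
  if PySem.Int.mod (PySem.Str.len (PySem.Int.toStr |a|)) 2 = 1 then
    match PySem.Str.pyGet? (PySem.Int.toStr |a|)
        (PySem.Int.floordiv (PySem.Str.len (PySem.Int.toStr |a|)) 2) with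
    | some c => (PySem.Int.ofChars? [c]).getD 0  -- unreachable default: the index is in range and the char is a digit
    | none => 0                                  -- unreachable for the same reason
  else -1

-- ===== PRECONDITION & SPEC =====
def Spec_digitocentral (a : Int) (out : Int) : Prop := out = digitocentral_alt a
instance (a : Int) (out : Int) : Decidable (Spec_digitocentral a out) := by unfold Spec_digitocentral; infer_instance

-- ===== CLAIM (what is proved, stated in full; the proofs are below) =====
def Claim_equal_digitocentral : Prop := ∀ (a : Int), Dom_digitocentral a → Spec_digitocentral a (digitocentral a)

-- ===== LEMMAS AND PROOFS =====

lemma pvCore_append (f : ℕ) : ∀ (n : ℕ) (l : List Char),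
    Nat.toDigitsCore 10 f n l = Nat.toDigitsCore 10 f n [] ++ l := by
  induction f with
  | zero => intro n l; simp [Nat.toDigitsCore]
  | succ f ih =>
    intro n l
    simp only [Nat.toDigitsCore]
    by_cases h : n / 10 = 0
    · simp [h]
    · simp only [h, if_false]
      rw [ih (n / 10) (Nat.digitChar (n % 10) :: l), ih (n / 10) [Nat.digitChar (n % 10)]]
      simp

lemma pvCore_fuel (n : ℕ) (f f' : ℕ) (hf : n < f) (hf' : n < f') :
    Nat.toDigitsCore 10 f n [] = Nat.toDigitsCore 10 f' n [] := by
  induction n using Nat.strong_induction_on generalizing f f' with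
  | _ n ih =>
    cases f with
    | zero => omega
    | succ f =>
      cases f' with
      | zero => omega
      | succ f' =>
        simp only [Nat.toDigitsCore]
        by_cases h : n / 10 = 0
        · simp [h]
        · simp only [h, if_false]
          rw [pvCore_append f, pvCore_append f']
          have hlt : n / 10 < n := Nat.div_lt_self (by omega) (by norm_num)
          rw [ih (n / 10) hlt f f' (by omega) (by omega)]

lemma pvToDigits_small {n : ℕ} (h : n < 10) : Nat.toDigits 10 n = [Nat.digitChar n] := by
  simp [Nat.toDigits, Nat.toDigitsCore, Nat.div_eq_of_lt h, Nat.mod_eq_of_lt h]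

lemma pvToDigits_step {n : ℕ} (h : 10 ≤ n) :
    Nat.toDigits 10 n = Nat.toDigits 10 (n / 10) ++ [Nat.digitChar (n % 10)] := by
  have h0 : n / 10 ≠ 0 := by omega
  simp only [Nat.toDigits, Nat.toDigitsCore, h0, if_false]
  rw [pvCore_append n]
  congr 1
  exact pvCore_fuel (n / 10) n (n / 10 + 1) (Nat.div_lt_self (by omega) (by norm_num)) (by omega)

lemma pvToDigits_length (k : ℕ) : ∀ (n : ℕ), (10 ^ k ≤ n ∨ k = 0) → n < 10 ^ (k + 1) →
    (Nat.toDigits 10 n).length = k + 1 := by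
  induction k with
  | zero => intro n _ h2; rw [pvToDigits_small (by simpa using h2)]; rfl
  | succ k ih =>
    intro n h1 h2
    have h10 : 10 ≤ n := by
      rcases h1 with h1 | h1
      · calc 10 = 10 ^ 1 := by norm_num
          _ ≤ 10 ^ (k + 1) := Nat.pow_le_pow_right (by norm_num) (by omega)
          _ ≤ n := h1
      · omega
    rw [pvToDigits_step h10, List.length_append]
    have := ih (n / 10)
      (Or.inl (Nat.le_div_iff_mul_le (by norm_num) |>.mpr (by
        rcases h1 with h1 | h1
        · calc 10 ^ k * 10 = 10 ^ (k + 1) := by ring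
            _ ≤ n := h1
        · omega)))
      (Nat.div_lt_of_lt_mul (by rw [Nat.mul_comm, ← pow_succ]; exact h2))
    simp [this]

lemma pvToDigits_get (k : ℕ) : ∀ (n j : ℕ), (10 ^ k ≤ n ∨ k = 0) → n < 10 ^ (k + 1) → j ≤ k →
    (Nat.toDigits 10 n)[j]? = some (Nat.digitChar (n / 10 ^ (k - j) % 10)) := by
  induction k with
  | zero =>
    intro n j _ h2 hj
    interval_cases j
    rw [pvToDigits_small (by simpa using h2)]
    simp [Nat.mod_eq_of_lt (show n < 10 by simpa using h2)]
  | succ k ih =>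
    intro n j h1 h2 hj
    have h10 : 10 ≤ n := by
      rcases h1 with h1 | h1
      · calc 10 = 10 ^ 1 := by norm_num
          _ ≤ 10 ^ (k + 1) := Nat.pow_le_pow_right (by norm_num) (by omega)
          _ ≤ n := h1
      · omega
    have hd1 : 10 ^ k ≤ n / 10 ∨ k = 0 := Or.inl (Nat.le_div_iff_mul_le (by norm_num) |>.mpr (by
      rcases h1 with h1 | h1
      · calc 10 ^ k * 10 = 10 ^ (k + 1) := by ring
          _ ≤ n := h1
      · omega))
    have hd2 : n / 10 < 10 ^ (k + 1) := Nat.div_lt_of_lt_mul (by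
      rw [Nat.mul_comm, ← pow_succ]; exact h2)
    have hlen : (Nat.toDigits 10 (n / 10)).length = k + 1 := pvToDigits_length k (n / 10) hd1 hd2
    rw [pvToDigits_step h10]
    by_cases hjk : j ≤ k
    · rw [List.getElem?_append_left (by omega), ih (n / 10) j hd1 hd2 hjk]
      congr 2
      rw [Nat.div_div_eq_div_mul]
      congr 1
      have : k + 1 - j = (k - j) + 1 := by omega
      rw [this, pow_succ, Nat.mul_comm]
    · have hj' : j = k + 1 := by omega
      subst hj'
      rw [List.getElem?_append_right (by omega)]
      simp [hlen]

lemma pvCountLoop_eq : ∀ (n : ℕ), 0 < n → ∀ (i : Int),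
    pvCountLoop (n : Int) i = (0, i + (Nat.toDigits 10 n).length) := by
  intro n
  induction n using Nat.strong_induction_on with
  | _ n ih =>
    intro hn i
    rw [pvCountLoop]
    have hpos : (n : Int) > 0 := by exact_mod_cast hn
    simp only [hpos, if_true]
    rw [show PySem.Int.floordiv (n : Int) 10 = ((n / 10 : ℕ) : Int) from
      PySem.Int.floordiv_natCast n 10]
    by_cases h : n < 10
    · have h0 : n / 10 = 0 := Nat.div_eq_of_lt h
      rw [h0, pvCountLoop]
      simp [pvToDigits_small h]
    · have hlt : n / 10 < n := Nat.div_lt_self (by omega) (by norm_num)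
      rw [ih (n / 10) hlt (by omega) (i + 1), pvToDigits_step (n := n) (by omega)]
      simp
      omega

lemma pvOfChars_digitChar (d : ℕ) (h : d < 10) :
    PySem.Int.ofChars? [Nat.digitChar d] = some (d : Int) := by
  interval_cases d <;> decide

-- A's 'while'-counted i on ↑m (0 < m) is the decimal length of m
lemma pvA_count (m : ℕ) (hm : 0 < m) :
    pvCountLoop (m : Int) 0 = (0, ((Nat.toDigits 10 m).length : Int)) := by
  rw [pvCountLoop_eq m hm 0]; simp

-- B on a nonnegative cast input, odd number of digits 2k+1: the middle digit
lemma pvB_odd (k m : ℕ) (h1 : 10 ^ (2 * k) ≤ m ∨ 2 * k = 0) (h2 : m < 10 ^ (2 * k + 1)) :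
    digitocentral_alt (m : Int) = ((m / 10 ^ k % 10 : ℕ) : Int) := by
  have habs : |(m : Int)| = (m : Int) := abs_of_nonneg (by positivity)
  have hchars : (PySem.Int.toStr (m : Int)).toList = Nat.toDigits 10 m := by
    rw [PySem.Int.toList_toStr]
    simp [PySem.Int.toChars]
  have hlen : (Nat.toDigits 10 m).length = 2 * k + 1 := pvToDigits_length (2 * k) m h1 h2
  have hL : PySem.Str.len (PySem.Int.toStr (m : Int)) = ((2 * k + 1 : ℕ) : Int) := by
    rw [PySem.Str.len_eq, hchars, hlen]
  unfold digitocentral_alt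
  rw [habs, hL]
  rw [show PySem.Int.mod ((2 * k + 1 : ℕ) : Int) 2 = (((2 * k + 1) % 2 : ℕ) : Int) from
    PySem.Int.mod_natCast _ 2]
  rw [show (2 * k + 1) % 2 = 1 from by omega, Nat.cast_one, if_pos rfl]
  rw [show PySem.Int.floordiv ((2 * k + 1 : ℕ) : Int) 2 = (((2 * k + 1) / 2 : ℕ) : Int) from
    PySem.Int.floordiv_natCast _ 2, show (2 * k + 1) / 2 = k from by omega]
  rw [PySem.Str.pyGet?_natCast, hchars, pvToDigits_get (2 * k) m k h1 h2 (by omega),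
    show 2 * k - k = k from by omega]
  show (PySem.Int.ofChars? [(m / 10 ^ k % 10).digitChar]).getD 0 = ((m / 10 ^ k % 10 : ℕ) : Int)
  rw [pvOfChars_digitChar _ (Nat.mod_lt _ (by norm_num))]
  rfl

-- B on a nonnegative cast input, even number of digits 2k+2: -1
lemma pvB_even (k m : ℕ) (h1 : 10 ^ (2 * k + 1) ≤ m) (h2 : m < 10 ^ (2 * k + 2)) :
    digitocentral_alt (m : Int) = -1 := by
  have habs : |(m : Int)| = (m : Int) := abs_of_nonneg (by positivity)
  have hchars : (PySem.Int.toStr (m : Int)).toList = Nat.toDigits 10 m := by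
    rw [PySem.Int.toList_toStr]
    simp [PySem.Int.toChars]
  have hlen : (Nat.toDigits 10 m).length = 2 * k + 2 :=
    pvToDigits_length (2 * k + 1) m (Or.inl h1) h2
  have hL : PySem.Str.len (PySem.Int.toStr (m : Int)) = ((2 * k + 2 : ℕ) : Int) := by
    rw [PySem.Str.len_eq, hchars, hlen]
  unfold digitocentral_alt
  rw [habs, hL]
  rw [show PySem.Int.mod ((2 * k + 2 : ℕ) : Int) 2 = (((2 * k + 2) % 2 : ℕ) : Int) from
    PySem.Int.mod_natCast _ 2]
  rw [show (2 * k + 2) % 2 = 0 from by omega, Nat.cast_zero, if_neg (by norm_num)]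

-- the modular middle-digit arithmetic of A, in ℕ (h ≥ 2 half-length)
lemma pvMidArith (h m : ℕ) (hh : 2 ≤ h) (hlo : 10 ^ (2 * h) ≤ m) :
    m % (m / 10 ^ (h + 1) * 10 ^ h) / 10 ^ h = m / 10 ^ h % 10 := by
  set P := 10 ^ h with hP
  set Q := m / 10 ^ (h + 1) with hQ
  have hP10 : 10 ^ (h + 1) = P * 10 := by rw [hP, pow_succ]
  have hQ10 : 10 ≤ Q := by
    rw [hQ]
    apply Nat.le_div_iff_mul_le (by positivity) |>.mpr
    calc 10 * 10 ^ (h + 1) = 10 ^ (h + 2) := by ring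
      _ ≤ 10 ^ (2 * h) := Nat.pow_le_pow_right (by norm_num) (by omega)
      _ ≤ m := hlo
  have hr : m % (P * 10) < Q * P := by
    calc m % (P * 10) < P * 10 := Nat.mod_lt _ (by positivity)
      _ = 10 * P := by ring
      _ ≤ Q * P := Nat.mul_le_mul_right _ hQ10
  have hQ' : Q = m / (P * 10) := by rw [hQ, hP10]
  have he : Q * P * 10 = P * 10 * (m / (P * 10)) := by rw [hQ']; ring
  have hm' : m = Q * P * 10 + m % (P * 10) := by
    have := Nat.div_add_mod m (P * 10)
    linarith [he]
  calc m % (Q * P) / P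
      = (Q * P * 10 + m % (P * 10)) % (Q * P) / P := by rw [← hm']
    _ = m % (P * 10) % (Q * P) / P := by rw [Nat.mul_add_mod]
    _ = m % (P * 10) / P := by rw [Nat.mod_eq_of_lt hr]
    _ = m / P % 10 := Nat.mod_mul_right_div_self m P 10

-- ===== VERDICT (by name: the statement is the Claim_ definition above) =====
theorem digitocentral_spec : Claim_equal_digitocentral := by
  intro a ha
  unfold Spec_digitocentral
  have hm : a.natAbs ≤ 2147483648 := by
    unfold Dom_digitocentral pvDomInt at ha
    simp at ha
    omega
  have hcast : ((a.natAbs : ℕ) : Int) = |a| := (Int.abs_eq_natAbs a).symm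
  have hA : (if a < 0 then a * (-1) else a) = ((a.natAbs : ℕ) : Int) := by
    by_cases h : a < 0
    · rw [if_pos h, hcast, mul_neg_one, abs_of_neg h]
    · rw [if_neg h, hcast, abs_of_nonneg (by omega)]
  have hB : digitocentral_alt a = digitocentral_alt ((a.natAbs : ℕ) : Int) := by
    unfold digitocentral_alt
    rw [show |a| = ((a.natAbs : ℕ) : Int) from by simp, abs_of_nonneg (by positivity)]
  rw [hB]
  unfold digitocentral
  rw [hA]
  set m := a.natAbs with hmdef
  clear_value m
  clear hA hB hcast hmdef ha a
  -- split on the number of decimal digits of m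
  have hcase : m ≤ 9 ∨ (10 ≤ m ∧ m ≤ 99) ∨ (100 ≤ m ∧ m ≤ 999) ∨ (1000 ≤ m ∧ m ≤ 9999) ∨
      (10000 ≤ m ∧ m ≤ 99999) ∨ (100000 ≤ m ∧ m ≤ 999999) ∨ (1000000 ≤ m ∧ m ≤ 9999999) ∨
      (10000000 ≤ m ∧ m ≤ 99999999) ∨ (100000000 ≤ m ∧ m ≤ 999999999) ∨
      (1000000000 ≤ m ∧ m ≤ 2147483648) := by omega
  rcases hcase with h | h | h | h | h | h | h | h | h | h
  · -- 1 digit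
    rw [if_neg (show ¬((m : Int) > 999) by omega), if_neg (show ¬((m:Int) > 99 ∧ (m:Int) < 1000) by omega),
      if_neg (show ¬((m : Int) > 9) by omega),
      pvB_odd 0 m (Or.inr rfl) (by norm_num; omega)]
    congr 1
    simp
    omega
  · -- 2 digits
    rw [if_neg (show ¬((m : Int) > 999) by omega), if_neg (show ¬((m:Int) > 99 ∧ (m:Int) < 1000) by omega),
      if_pos (show (m : Int) > 9 by omega),
      pvB_even 0 m (by norm_num; omega) (by norm_num; omega)]
  · -- 3 digits
    rw [if_neg (show ¬((m : Int) > 999) by omega), if_pos (show (m:Int) > 99 ∧ (m:Int) < 1000 by omega),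
      pvB_odd 1 m (Or.inl (by norm_num; omega)) (by norm_num; omega)]
    rw [show PySem.Int.floordiv ((m:ℕ) : Int) 10 = ((m / 10 : ℕ) : Int) from PySem.Int.floordiv_natCast m 10,
      show PySem.Int.mod ((m / 10 : ℕ) : Int) 10 = ((m / 10 % 10 : ℕ) : Int) from PySem.Int.mod_natCast _ 10]
    norm_num
  · -- 4 digits
    rw [if_pos (show (m : Int) > 999 by omega), pvA_count m (by omega),
      show (Nat.toDigits 10 m).length = 4 from pvToDigits_length 3 m (Or.inl (by norm_num; omega)) (by norm_num; omega),
      pvB_even 1 m (by norm_num; omega) (by norm_num; omega)]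
    push_cast
    norm_num [PySem.Int.mod, PySem.Int.floordiv]
    intro hc
    exact absurd hc (by decide)
  · -- 5 digits
    rw [if_pos (show (m : Int) > 999 by omega), pvA_count m (by omega),
      show (Nat.toDigits 10 m).length = 5 from pvToDigits_length 4 m (Or.inl (by norm_num; omega)) (by norm_num; omega),
      pvB_odd 2 m (Or.inl (by norm_num; omega)) (by norm_num; omega)]
    push_cast
    norm_num [PySem.Int.mod, PySem.Int.floordiv]
    rw [if_pos (show (5:ℤ).fmod 2 = 1 from by decide),
        show ((5:ℤ).fdiv 2 + 1).toNat = 3 from by decide,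
        show ((5:ℤ).fdiv 2).toNat = 2 from by decide]
    norm_num
    have h5 := pvMidArith 2 m (by norm_num) (by norm_num; omega)
    norm_num at h5
    have e1 : ((m:ℤ)).fdiv 1000 = (m:ℤ) / 1000 := by simp [Int.fdiv_eq_ediv]
    rw [e1]
    have hpos : (0:ℤ) ≤ (m:ℤ) / 1000 * 100 := by positivity
    have e2 : ((m:ℤ)).fmod ((m:ℤ) / 1000 * 100) = (m:ℤ) % ((m:ℤ) / 1000 * 100) := by
      simp [Int.fmod_eq_emod, hpos]
    rw [e2, show ((m:ℤ) % ((m:ℤ) / 1000 * 100)).fdiv 100 = ((m:ℤ) % ((m:ℤ) / 1000 * 100)) / 100 from by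
      simp [Int.fdiv_eq_ediv]]
    exact_mod_cast h5
  · -- 6 digits
    rw [if_pos (show (m : Int) > 999 by omega), pvA_count m (by omega),
      show (Nat.toDigits 10 m).length = 6 from pvToDigits_length 5 m (Or.inl (by norm_num; omega)) (by norm_num; omega),
      pvB_even 2 m (by norm_num; omega) (by norm_num; omega)]
    push_cast
    norm_num [PySem.Int.mod, PySem.Int.floordiv]
    intro hc
    exact absurd hc (by decide)
  · -- 7 digits
    rw [if_pos (show (m : Int) > 999 by omega), pvA_count m (by omega),
      show (Nat.toDigits 10 m).length = 7 from pvToDigits_length 6 m (Or.inl (by norm_num; omega)) (by norm_num; omega),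
      pvB_odd 3 m (Or.inl (by norm_num; omega)) (by norm_num; omega)]
    push_cast
    norm_num [PySem.Int.mod, PySem.Int.floordiv]
    rw [if_pos (show (7:ℤ).fmod 2 = 1 from by decide),
        show ((7:ℤ).fdiv 2 + 1).toNat = 4 from by decide,
        show ((7:ℤ).fdiv 2).toNat = 3 from by decide]
    norm_num
    have h5 := pvMidArith 3 m (by norm_num) (by norm_num; omega)
    norm_num at h5
    have e1 : ((m:ℤ)).fdiv 10000 = (m:ℤ) / 10000 := by simp [Int.fdiv_eq_ediv]
    rw [e1]
    have hpos : (0:ℤ) ≤ (m:ℤ) / 10000 * 1000 := by positivity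
    have e2 : ((m:ℤ)).fmod ((m:ℤ) / 10000 * 1000) = (m:ℤ) % ((m:ℤ) / 10000 * 1000) := by
      simp [Int.fmod_eq_emod, hpos]
    rw [e2, show ((m:ℤ) % ((m:ℤ) / 10000 * 1000)).fdiv 1000 = ((m:ℤ) % ((m:ℤ) / 10000 * 1000)) / 1000 from by
      simp [Int.fdiv_eq_ediv]]
    exact_mod_cast h5
  · -- 8 digits
    rw [if_pos (show (m : Int) > 999 by omega), pvA_count m (by omega),
      show (Nat.toDigits 10 m).length = 8 from pvToDigits_length 7 m (Or.inl (by norm_num; omega)) (by norm_num; omega),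
      pvB_even 3 m (by norm_num; omega) (by norm_num; omega)]
    push_cast
    norm_num [PySem.Int.mod, PySem.Int.floordiv]
    intro hc
    exact absurd hc (by decide)
  · -- 9 digits
    rw [if_pos (show (m : Int) > 999 by omega), pvA_count m (by omega),
      show (Nat.toDigits 10 m).length = 9 from pvToDigits_length 8 m (Or.inl (by norm_num; omega)) (by norm_num; omega),
      pvB_odd 4 m (Or.inl (by norm_num; omega)) (by norm_num; omega)]
    push_cast
    norm_num [PySem.Int.mod, PySem.Int.floordiv]
    rw [if_pos (show (9:ℤ).fmod 2 = 1 from by decide),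
        show ((9:ℤ).fdiv 2 + 1).toNat = 5 from by decide,
        show ((9:ℤ).fdiv 2).toNat = 4 from by decide]
    norm_num
    have h5 := pvMidArith 4 m (by norm_num) (by norm_num; omega)
    norm_num at h5
    have e1 : ((m:ℤ)).fdiv 100000 = (m:ℤ) / 100000 := by simp [Int.fdiv_eq_ediv]
    rw [e1]
    have hpos : (0:ℤ) ≤ (m:ℤ) / 100000 * 10000 := by positivity
    have e2 : ((m:ℤ)).fmod ((m:ℤ) / 100000 * 10000) = (m:ℤ) % ((m:ℤ) / 100000 * 10000) := by
      simp [Int.fmod_eq_emod, hpos]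
    rw [e2, show ((m:ℤ) % ((m:ℤ) / 100000 * 10000)).fdiv 10000 = ((m:ℤ) % ((m:ℤ) / 100000 * 10000)) / 10000 from by
      simp [Int.fdiv_eq_ediv]]
    exact_mod_cast h5
  · -- 10 digits
    rw [if_pos (show (m : Int) > 999 by omega), pvA_count m (by omega),
      show (Nat.toDigits 10 m).length = 10 from pvToDigits_length 9 m (Or.inl (by norm_num; omega)) (by norm_num; omega),
      pvB_even 4 m (by norm_num; omega) (by norm_num; omega)]
    push_cast
    norm_num [PySem.Int.mod, PySem.Int.floordiv]
    intro hc
    exact absurd hc (by decide)
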